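-- pv_equiv track=rewrite | github.com/ntc-google-fit/google_fit_project | prepro.py | print_chunks
-- ===== SOURCE A (Python) =====
-- def print_chunks(chunks):
--     output = ''
--     for chunk in chunks:
--         if (chunk[0] == 'Vehicle'):
--             if chunk[2][0] > 0:
--                 output = output + 'You travelled by transport for {} hour, {} minutes and {} seconds\n\n'.format(
--                     chunk[2][0], chunk[2][1], chunk[2][2])
--             else:
--                 output = output + \
--                     'You travelled by transport for {} minutes and {} seconds\n\n'.format(
--                         chunk[2][1], chunk[2][2])
--         elif (chunk[0] == 'Walking'):
--             if chunk[2][0] > 0: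
--                 output = output + 'You walked for {} hour, {} minutes and {} seconds\n\n'.format(
--                     chunk[2][0], chunk[2][1], chunk[2][2])
--             else:
--                 output = output + \
--                     'You walked for {} minutes and {} seconds\n\n'.format(
--                         chunk[2][1], chunk[2][2])
--         elif (chunk[0] == 'Still'):
--             if chunk[2][0] > 0:
--                 output = output + 'You rested for {} hour, {} minutes and {} seconds\n\n'.format(
--                     chunk[2][0], chunk[2][1], chunk[2][2])
--             else:
--                 output = output + \
--                     'You rested for {} minutes and {} seconds\n\n'.format(
--                         chunk[2][1], chunk[2][2])
--     return output
-- ===== SOURCE B (Python) =====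
-- def print_chunks(chunks):
--     VERBS = {'Vehicle': 'travelled by transport',
--              'Walking': 'walked',
--              'Still': 'rested'}
--
--     def fmt(part):
--         # divide and conquer: the report for a list is the report of its two halves
--         if not part:
--             return ''
--         if len(part) == 1:
--             label, _, (h, m, s) = part[0]
--             if label not in VERBS:
--                 return ''
--             hour = '{} hour, '.format(h) if h > 0 else ''
--             return 'You {} for {}{} minutes and {} seconds\n\n'.format(VERBS[label], hour, m, s)
--         mid = len(part) // 2
--         return fmt(part[:mid]) + fmt(part[mid:])
--
--     return fmt(chunks)
-- ===== Notes on version B (the rewrite author's own statement) =====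
-- stated objective: alternative
-- what changed: Replaces A's linear left-to-right accumulation over three duplicated if/elif branch templates with a divide-and-conquer formatter (split the list in halves, format each half recursively, concatenate) whose base case uses one unified template with a conditionally inserted hour segment; correct because string concatenation is associative, so any split order yields the same report.
import Mathlib
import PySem

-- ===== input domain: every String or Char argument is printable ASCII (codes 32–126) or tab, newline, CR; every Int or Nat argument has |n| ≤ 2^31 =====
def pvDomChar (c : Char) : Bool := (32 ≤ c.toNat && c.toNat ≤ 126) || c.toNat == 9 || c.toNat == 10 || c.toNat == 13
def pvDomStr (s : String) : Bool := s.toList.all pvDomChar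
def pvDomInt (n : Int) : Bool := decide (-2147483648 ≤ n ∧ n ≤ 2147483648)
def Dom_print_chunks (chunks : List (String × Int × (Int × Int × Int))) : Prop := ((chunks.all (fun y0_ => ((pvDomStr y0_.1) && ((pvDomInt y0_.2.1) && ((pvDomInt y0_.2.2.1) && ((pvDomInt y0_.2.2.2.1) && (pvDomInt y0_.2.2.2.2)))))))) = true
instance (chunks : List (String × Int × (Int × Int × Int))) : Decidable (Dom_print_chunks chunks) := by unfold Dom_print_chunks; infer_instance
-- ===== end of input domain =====

-- B replaces A's linear accumulation over three duplicated if/elif templates by a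
-- divide-and-conquer formatter: split in halves, format each half recursively, concatenate;
-- the base case uses one unified template with a conditional hour segment (objective: alternative).


-- ===== PORT A =====
def print_chunks (chunks : List (String × Int × (Int × Int × Int))) : String :=
  chunks.foldl (fun output chunk =>
    if chunk.1 == "Vehicle" then
      if chunk.2.2.1 > 0 then
        output ++ ("You travelled by transport for " ++ PySem.Int.toStr chunk.2.2.1 ++ " hour, " ++ PySem.Int.toStr chunk.2.2.2.1 ++ " minutes and " ++ PySem.Int.toStr chunk.2.2.2.2 ++ " seconds\n\n")
      else
        output ++ ("You travelled by transport for " ++ PySem.Int.toStr chunk.2.2.2.1 ++ " minutes and " ++ PySem.Int.toStr chunk.2.2.2.2 ++ " seconds\n\n")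
    else if chunk.1 == "Walking" then
      if chunk.2.2.1 > 0 then
        output ++ ("You walked for " ++ PySem.Int.toStr chunk.2.2.1 ++ " hour, " ++ PySem.Int.toStr chunk.2.2.2.1 ++ " minutes and " ++ PySem.Int.toStr chunk.2.2.2.2 ++ " seconds\n\n")
      else
        output ++ ("You walked for " ++ PySem.Int.toStr chunk.2.2.2.1 ++ " minutes and " ++ PySem.Int.toStr chunk.2.2.2.2 ++ " seconds\n\n")
    else if chunk.1 == "Still" then
      if chunk.2.2.1 > 0 then
        output ++ ("You rested for " ++ PySem.Int.toStr chunk.2.2.1 ++ " hour, " ++ PySem.Int.toStr chunk.2.2.2.1 ++ " minutes and " ++ PySem.Int.toStr chunk.2.2.2.2 ++ " seconds\n\n")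
      else
        output ++ ("You rested for " ++ PySem.Int.toStr chunk.2.2.2.1 ++ " minutes and " ++ PySem.Int.toStr chunk.2.2.2.2 ++ " seconds\n\n")
    else output) ""

-- ===== PORT B =====
def pvVerbs : PySem.Dict String String :=
  PySem.Dict.ofList [("Vehicle", "travelled by transport"), ("Walking", "walked"), ("Still", "rested")]

-- termination helpers cited by pvFmt's decreasing_by
theorem pvSliceTo_len (xs : List (String × Int × (Int × Int × Int))) (hx : 2 ≤ xs.length) :
    (PySem.List.slice xs none (some (PySem.Int.floordiv (xs.length : Int) 2))).length < xs.length := by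
  have h2 : PySem.Int.floordiv ((xs.length : Nat) : Int) ((2 : Nat) : Int) = ((xs.length / 2 : Nat) : Int) :=
    PySem.Int.floordiv_natCast xs.length 2
  have h2' : PySem.Int.floordiv (xs.length : Int) 2 = ((xs.length / 2 : Nat) : Int) := by exact_mod_cast h2
  rw [h2', PySem.List.slice_to_natCast]
  simp only [List.length_take]
  omega

theorem pvSliceFrom_len (xs : List (String × Int × (Int × Int × Int))) (hx : 2 ≤ xs.length) :
    (PySem.List.slice xs (some (PySem.Int.floordiv (xs.length : Int) 2)) none).length < xs.length := by
  have h2 : PySem.Int.floordiv ((xs.length : Nat) : Int) ((2 : Nat) : Int) = ((xs.length / 2 : Nat) : Int) :=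
    PySem.Int.floordiv_natCast xs.length 2
  have h2' : PySem.Int.floordiv (xs.length : Int) 2 = ((xs.length / 2 : Nat) : Int) := by exact_mod_cast h2
  rw [h2', PySem.List.slice_from_natCast]
  simp only [List.length_drop]
  omega

def pvFmt : List (String × Int × (Int × Int × Int)) → String
  | [] => ""
  | [c] =>
      match PySem.Dict.get? pvVerbs c.1 with
      | none => ""
      | some verb =>
          let hour := if c.2.2.1 > 0 then PySem.Int.toStr c.2.2.1 ++ " hour, " else ""
          "You " ++ verb ++ " for " ++ hour ++ PySem.Int.toStr c.2.2.2.1 ++ " minutes and " ++ PySem.Int.toStr c.2.2.2.2 ++ " seconds\n\n"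
  | a :: b :: rest =>
      let whole := a :: b :: rest
      let mid := PySem.Int.floordiv (whole.length : Int) 2
      pvFmt (PySem.List.slice whole none (some mid)) ++ pvFmt (PySem.List.slice whole (some mid) none)
termination_by part => part.length
decreasing_by
  · exact pvSliceTo_len (a :: b :: rest) (by simp)
  · exact pvSliceFrom_len (a :: b :: rest) (by simp)

def print_chunks_alt (chunks : List (String × Int × (Int × Int × Int))) : String :=
  pvFmt chunks

-- ===== PRECONDITION & SPEC =====
def Spec_print_chunks (chunks : List (String × Int × (Int × Int × Int))) (out : String) : Prop := out = print_chunks_alt chunks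
instance (chunks : List (String × Int × (Int × Int × Int))) (out : String) : Decidable (Spec_print_chunks chunks out) := by unfold Spec_print_chunks; infer_instance

-- ===== CLAIM (what is proved, stated in full; the proofs are below) =====
def Claim_equal_print_chunks : Prop := ∀ (chunks : List (String × Int × (Int × Int × Int))), Dom_print_chunks chunks → Spec_print_chunks chunks (print_chunks chunks)

-- ===== LEMMAS AND PROOFS =====

-- the text B produces for one chunk (proof vocabulary; equals pvFmt on singletons)
def pvPiece (c : String × Int × (Int × Int × Int)) : String :=
  match PySem.Dict.get? pvVerbs c.1 with
  | none => ""
  | some verb =>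
      let hour := if c.2.2.1 > 0 then PySem.Int.toStr c.2.2.1 ++ " hour, " else ""
      "You " ++ verb ++ " for " ++ hour ++ PySem.Int.toStr c.2.2.2.1 ++ " minutes and " ++ PySem.Int.toStr c.2.2.2.2 ++ " seconds\n\n"

def pvSC (l : List String) : String := l.foldr (· ++ ·) ""

theorem pvSC_append (x y : List String) : pvSC (x ++ y) = pvSC x ++ pvSC y := by
  induction x with
  | nil => simp [pvSC]
  | cons a t ih =>
      show a ++ pvSC (t ++ y) = (a ++ pvSC t) ++ pvSC y
      rw [ih, String.append_assoc]

theorem pvFmt_singleton (c : String × Int × (Int × Int × Int)) : pvFmt [c] = pvPiece c := by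
  rw [pvFmt]; rfl

theorem pvFmt_eq (n : Nat) : ∀ l : List (String × Int × (Int × Int × Int)), l.length ≤ n → pvFmt l = pvSC (l.map pvPiece) := by
  induction n with
  | zero =>
      intro l hl
      have : l = [] := by cases l <;> simp_all
      subst this; rw [pvFmt]; rfl
  | succ n ih =>
      intro l hl
      match l with
      | [] => rw [pvFmt]; rfl
      | [c] => rw [pvFmt_singleton]; simp [pvSC]
      | a :: b :: rest =>
          have hlen : 2 ≤ (a :: b :: rest).length := by simp
          have h2 : PySem.Int.floordiv (((a :: b :: rest).length : Nat) : Int) ((2 : Nat) : Int) = (((a :: b :: rest).length / 2 : Nat) : Int) :=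
            PySem.Int.floordiv_natCast _ 2
          have h2' : PySem.Int.floordiv (((a :: b :: rest).length) : Int) 2 = (((a :: b :: rest).length / 2 : Nat) : Int) := by exact_mod_cast h2
          rw [pvFmt]
          simp only [h2', PySem.List.slice_to_natCast, PySem.List.slice_from_natCast]
          set k := (a :: b :: rest).length / 2 with hk
          have hkl : ((a :: b :: rest).take k).length ≤ n := by
            simp only [List.length_take]; omega
          have hkr : ((a :: b :: rest).drop k).length ≤ n := by
            simp only [List.length_drop]
            have : 1 ≤ k := by omega
            omega
          rw [ih _ hkl, ih _ hkr, ← pvSC_append, ← List.map_append, List.take_append_drop]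

theorem pvPhrases_eq : pvVerbs = PySem.Dict.mk [("Vehicle", "travelled by transport"), ("Walking", "walked"), ("Still", "rested")] := by decide

theorem pv_piece (chunk : String × Int × (Int × Int × Int)) (output : String) :
    (if chunk.1 == "Vehicle" then
      if chunk.2.2.1 > 0 then
        output ++ ("You travelled by transport for " ++ PySem.Int.toStr chunk.2.2.1 ++ " hour, " ++ PySem.Int.toStr chunk.2.2.2.1 ++ " minutes and " ++ PySem.Int.toStr chunk.2.2.2.2 ++ " seconds\n\n")
      else
        output ++ ("You travelled by transport for " ++ PySem.Int.toStr chunk.2.2.2.1 ++ " minutes and " ++ PySem.Int.toStr chunk.2.2.2.2 ++ " seconds\n\n")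
    else if chunk.1 == "Walking" then
      if chunk.2.2.1 > 0 then
        output ++ ("You walked for " ++ PySem.Int.toStr chunk.2.2.1 ++ " hour, " ++ PySem.Int.toStr chunk.2.2.2.1 ++ " minutes and " ++ PySem.Int.toStr chunk.2.2.2.2 ++ " seconds\n\n")
      else
        output ++ ("You walked for " ++ PySem.Int.toStr chunk.2.2.2.1 ++ " minutes and " ++ PySem.Int.toStr chunk.2.2.2.2 ++ " seconds\n\n")
    else if chunk.1 == "Still" then
      if chunk.2.2.1 > 0 then
        output ++ ("You rested for " ++ PySem.Int.toStr chunk.2.2.1 ++ " hour, " ++ PySem.Int.toStr chunk.2.2.2.1 ++ " minutes and " ++ PySem.Int.toStr chunk.2.2.2.2 ++ " seconds\n\n")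
      else
        output ++ ("You rested for " ++ PySem.Int.toStr chunk.2.2.2.1 ++ " minutes and " ++ PySem.Int.toStr chunk.2.2.2.2 ++ " seconds\n\n")
    else output)
    = output ++ pvPiece chunk := by
  obtain ⟨lab, pos, h, m, s⟩ := chunk
  by_cases hv : lab = "Vehicle"
  · subst hv
    simp only [pvPiece, pvPhrases_eq, PySem.Dict.get?_mk_cons,
      show (("Vehicle" : String) == "Vehicle") = true from by decide]
    split_ifs with hh <;>
      simp_all [String.append_assoc]
  · by_cases hw : lab = "Walking"
    · subst hw
      simp only [pvPiece, pvPhrases_eq, PySem.Dict.get?_mk_cons,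
        show (("Walking" : String) == "Vehicle") = false from by decide,
        show (("Walking" : String) == "Walking") = true from by decide]
      split_ifs with hh <;>
        simp_all [String.append_assoc]
    · by_cases hs : lab = "Still"
      · subst hs
        simp only [pvPiece, pvPhrases_eq, PySem.Dict.get?_mk_cons,
          show (("Still" : String) == "Vehicle") = false from by decide,
          show (("Still" : String) == "Walking") = false from by decide,
          show (("Still" : String) == "Still") = true from by decide]
        split_ifs with hh <;>
          simp_all [String.append_assoc]
      · have hb1 : (lab == "Vehicle") = false := by simp [hv]
        have hb2 : (lab == "Walking") = false := by simp [hw]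
        have hb3 : (lab == "Still") = false := by simp [hs]
        have hb1' : (("Vehicle" : String) == lab) = false := by simp; exact fun e => hv e.symm
        have hb2' : (("Walking" : String) == lab) = false := by simp; exact fun e => hw e.symm
        have hb3' : (("Still" : String) == lab) = false := by simp; exact fun e => hs e.symm
        simp only [pvPiece, pvPhrases_eq, PySem.Dict.get?_mk_cons, hb1, hb2, hb3, hb1', hb2', hb3',
          Bool.false_eq_true, if_false]
        simp [PySem.Dict.get?]

theorem pv_main (chunks : List (String × Int × (Int × Int × Int))) (acc : String) :
    chunks.foldl (fun output chunk =>
      if chunk.1 == "Vehicle" then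
        if chunk.2.2.1 > 0 then
          output ++ ("You travelled by transport for " ++ PySem.Int.toStr chunk.2.2.1 ++ " hour, " ++ PySem.Int.toStr chunk.2.2.2.1 ++ " minutes and " ++ PySem.Int.toStr chunk.2.2.2.2 ++ " seconds\n\n")
        else
          output ++ ("You travelled by transport for " ++ PySem.Int.toStr chunk.2.2.2.1 ++ " minutes and " ++ PySem.Int.toStr chunk.2.2.2.2 ++ " seconds\n\n")
      else if chunk.1 == "Walking" then
        if chunk.2.2.1 > 0 then
          output ++ ("You walked for " ++ PySem.Int.toStr chunk.2.2.1 ++ " hour, " ++ PySem.Int.toStr chunk.2.2.2.1 ++ " minutes and " ++ PySem.Int.toStr chunk.2.2.2.2 ++ " seconds\n\n")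
        else
          output ++ ("You walked for " ++ PySem.Int.toStr chunk.2.2.2.1 ++ " minutes and " ++ PySem.Int.toStr chunk.2.2.2.2 ++ " seconds\n\n")
      else if chunk.1 == "Still" then
        if chunk.2.2.1 > 0 then
          output ++ ("You rested for " ++ PySem.Int.toStr chunk.2.2.1 ++ " hour, " ++ PySem.Int.toStr chunk.2.2.2.1 ++ " minutes and " ++ PySem.Int.toStr chunk.2.2.2.2 ++ " seconds\n\n")
        else
          output ++ ("You rested for " ++ PySem.Int.toStr chunk.2.2.2.1 ++ " minutes and " ++ PySem.Int.toStr chunk.2.2.2.2 ++ " seconds\n\n")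
      else output) acc
    = acc ++ pvSC (chunks.map pvPiece) := by
  induction chunks generalizing acc with
  | nil => simp [pvSC]
  | cons c t ih =>
    simp only [List.foldl_cons, List.map_cons]
    rw [pv_piece c acc, ih]
    show (acc ++ pvPiece c) ++ pvSC (t.map pvPiece) = acc ++ pvSC (pvPiece c :: t.map pvPiece)
    simp [pvSC, String.append_assoc]

-- ===== VERDICT (by name: the statement is the Claim_ definition above) =====
theorem print_chunks_spec : Claim_equal_print_chunks := by
  intro chunks _
  unfold Spec_print_chunks print_chunks print_chunks_alt
  rw [pv_main chunks "", pvFmt_eq chunks.length chunks le_rfl]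
  simp
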